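-- pv_equiv track=rewrite | github.com/KoGaYoung/Algorithm | 알고리즘/테스트/데브매칭1.py | solution
-- ===== SOURCE A (Python) =====
-- def solution(registered_list, new_id):
--     '''
--     S : 소문자(a~z) 문자열 길이는 3 ~ 6
--     N : 숫자(0~9) 문자열 길이는 0 ~ 6 -> 비어있을수도 첫자리는0아님
--
--     '''
--     if new_id not in registered_list:
--         return new_id
--     else:
--         c = 0
--         len_id = len(new_id)
--         while c < len_id and new_id[c].isalpha():
--             c += 1
--         s = new_id[:c]
--         n = new_id[c:]
--
--         n_n = 1 if n == '' else int(n) + 1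
--         while s + str(n_n) in registered_list:
--             n_n += 1
--
--     return s + str(n_n)
-- ===== SOURCE B (Python) =====
-- def solution(registered_list, new_id):
--     if new_id not in registered_list:
--         return new_id
--     c = 0
--     while c < len(new_id) and new_id[c].isalpha():
--         c += 1
--     s = new_id[:c]
--     n = new_id[c:]
--     start = 1 if n == '' else int(n) + 1
--     # one pass: index every registered id that is exactly s + canonical digits
--     taken = set()
--     for e in registered_list:
--         if e.startswith(s):
--             r = e[len(s):]
--             if r.isdigit() and (r == '0' or r[0] != '0'):
--                 taken.add(int(r))
--     # first free suffix >= start, by scanning the sorted taken numbers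
--     k = start
--     for t in sorted(taken):
--         if t < k:
--             continue
--         if t == k:
--             k += 1
--         else:
--             break
--     return s + str(k)
-- ===== Notes on version B (the rewrite author's own statement) =====
-- stated objective: alternative
-- what changed: A increments the suffix number and rescans registered_list for each probe; B makes one pass over registered_list building a set of the integers whose canonical digit suffix of the prefix is registered, then finds the first free number >= start by a single scan over the sorted set.
-- outside the precondition, e.g. on solution(['a-3', 'a-2'], 'a-3'): A returns 'a-1', B returns 'a-2'; on solution(['a.'], 'a.'): A raises ValueError, B raises ValueError
import Mathlib
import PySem

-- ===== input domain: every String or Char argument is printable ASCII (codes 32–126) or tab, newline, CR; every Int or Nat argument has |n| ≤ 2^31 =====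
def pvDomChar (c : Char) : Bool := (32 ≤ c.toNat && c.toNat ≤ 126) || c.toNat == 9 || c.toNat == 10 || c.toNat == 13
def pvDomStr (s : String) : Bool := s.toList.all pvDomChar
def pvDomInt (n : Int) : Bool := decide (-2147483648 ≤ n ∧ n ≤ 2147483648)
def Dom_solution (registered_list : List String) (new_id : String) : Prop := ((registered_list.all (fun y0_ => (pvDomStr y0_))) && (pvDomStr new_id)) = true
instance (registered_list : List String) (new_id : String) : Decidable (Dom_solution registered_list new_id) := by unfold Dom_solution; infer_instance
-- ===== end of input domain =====

-- B replaces A's probe-and-rescan loop (each probe rescans registered_list) by one indexing pass that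
-- collects the registered canonical numeric suffixes of the prefix into a set and then takes the first
-- free number ≥ start from the sorted set (objective: alternative algorithm, same result).

-- ===== PORT A =====

-- 'while c < len_id and new_id[c].isalpha(): c += 1' — the resulting count c
def pvAlphaCount : List Char → Nat
  | [] => 0
  | ch :: t => if PySem.Chars.isalpha ch then pvAlphaCount t + 1 else 0

-- 'while s + str(n_n) in registered_list: n_n += 1'; the loop always exits within
-- registered_list.length + 1 probes (the probe strings are pairwise distinct), which is the fuel used
def pvProbeA (l : List String) (s : List Char) : Nat → Int → Int
  | 0, k => k
  | m + 1, k => if String.ofList (s ++ PySem.Int.toChars k) ∈ l then pvProbeA l s m (k + 1) else k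

def solution (registered_list : List String) (new_id : String) : String :=
  if new_id ∉ registered_list then new_id
  else
    let cs := new_id.toList
    let c := pvAlphaCount cs
    let s := cs.take c
    let n := cs.drop c
    -- n_n = 1 if n == '' else int(n) + 1 ; Pre_ guarantees int(n) succeeds, getD 0 is unreachable filler
    let n_n : Int := if n = [] then 1 else (PySem.Int.ofChars? n).getD 0 + 1
    String.ofList (s ++ PySem.Int.toChars (pvProbeA registered_list s (registered_list.length + 1) n_n))

-- ===== PORT B =====

-- int(r) for a nonempty ASCII digit string r (the only strings B applies it to): the decimal fold,
-- exact there by Python's int semantics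
def pvDigitsVal (r : List Char) : Int := r.foldl (fun a c => a * 10 + ((c.toNat : Int) - 48)) 0

-- the single indexing pass: { int(r) | s + r registered, r a canonical digit string }
def pvCollect (s : List Char) (l : List String) : PySem.Set Int :=
  l.foldl (fun acc e =>
    if PySem.Chars.startswith e.toList s then
      if PySem.Chars.strIsdigit (e.toList.drop s.length) ∧
          (e.toList.drop s.length = ['0'] ∨ (e.toList.drop s.length).head? ≠ some '0') then
        PySem.Set.add acc (pvDigitsVal (e.toList.drop s.length))
      else acc
    else acc) PySem.Set.empty

-- 'for t in sorted(taken): …' — first free number ≥ k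
def pvScan : Int → List Int → Int
  | k, [] => k
  | k, t :: ts => if t < k then pvScan k ts else if t = k then pvScan (k + 1) ts else k

def solution_alt (registered_list : List String) (new_id : String) : String :=
  if new_id ∉ registered_list then new_id
  else
    let cs := new_id.toList
    let c := pvAlphaCount cs
    let s := cs.take c
    let n := cs.drop c
    let start : Int := if n = [] then 1 else (PySem.Int.ofChars? n).getD 0 + 1
    let taken := pvCollect s registered_list
    String.ofList (s ++ PySem.Int.toChars (pvScan start (PySem.List.sorted taken (fun x => x) false)))

-- ===== PRECONDITION & SPEC =====

-- Pre_ excludes (a) inputs where A raises ValueError (a registered new_id whose suffix int() rejects),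
-- and (b) the corner where a registered new_id's suffix int()-parses to a value v ≤ -2 while the id
-- with the next negative suffix is registered too: there A keeps probing negative suffixes — an
-- accident relative to the function's documented digit-only suffix domain — while B only indexes
-- canonical digit suffixes, and both choices are defensible.
def Pre_solution (registered_list : List String) (new_id : String) : Prop :=
  new_id ∉ registered_list ∨
  (let n := new_id.toList.dropWhile (fun ch => PySem.Chars.isalpha ch)
   n = [] ∨
     ((PySem.Int.ofChars? n).isSome = true ∧
      (-1 ≤ (PySem.Int.ofChars? n).getD 0 ∨
       String.ofList (new_id.toList.takeWhile (fun ch => PySem.Chars.isalpha ch)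
           ++ PySem.Int.toChars ((PySem.Int.ofChars? n).getD 0 + 1))
         ∉ registered_list)))
instance (registered_list : List String) (new_id : String) : Decidable (Pre_solution registered_list new_id) := by
  unfold Pre_solution; infer_instance

def pvWitness_solution : List String × String := (["abc1", "abc2"], "abc1")

def Spec_solution (registered_list : List String) (new_id : String) (out : String) : Prop := out = solution_alt registered_list new_id
instance (registered_list : List String) (new_id : String) (out : String) : Decidable (Spec_solution registered_list new_id out) := by unfold Spec_solution; infer_instance

-- ===== CLAIM (what is proved, stated in full; the proofs are below) =====
def Claim_equal_solution : Prop := ∀ (registered_list : List String) (new_id : String), Dom_solution registered_list new_id → Pre_solution registered_list new_id → Spec_solution registered_list new_id (solution registered_list new_id)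

-- ===== LEMMAS AND PROOFS =====

def pvDigits (n : Nat) : List Char :=
  if h : n < 10 then [Nat.digitChar n]
  else pvDigits (n / 10) ++ [Nat.digitChar (n % 10)]
decreasing_by exact Nat.div_lt_self (by omega) (by omega)

theorem pvToDigitsCore_eq (f : Nat) : ∀ (n : Nat) (acc : List Char), n < f →
    Nat.toDigitsCore 10 f n acc = pvDigits n ++ acc := by
  induction f with
  | zero => intro n acc h; omega
  | succ f ih =>
    intro n acc h
    rw [Nat.toDigitsCore]
    by_cases h10 : n / 10 = 0
    · have hlt : n < 10 := by
        rcases Nat.div_eq_zero_iff.mp h10 with h' | h'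
        · omega
        · exact h'
      have hm : n % 10 = n := Nat.mod_eq_of_lt hlt
      simp only [h10, if_pos, hm]
      rw [pvDigits, dif_pos hlt]
      simp
    · have hge : ¬ n < 10 := by
        intro hlt
        exact h10 (Nat.div_eq_of_lt hlt)
      have hpos : 0 < n := by omega
      have hn10 : n / 10 < f := by
        have := Nat.div_lt_self hpos (by omega : 1 < 10)
        omega
      rw [if_neg h10, ih _ _ hn10]
      conv_rhs => rw [pvDigits]
      rw [dif_neg hge]
      simp
theorem pvToDigits_eq (n : Nat) : Nat.toDigits 10 n = pvDigits n := by
  rw [Nat.toDigits, pvToDigitsCore_eq (n + 1) n [] (by omega)]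
  simp
theorem pvToChars_nonneg (k : Int) (h : 0 ≤ k) : PySem.Int.toChars k = pvDigits k.toNat := by
  rw [PySem.Int.toChars, if_neg (by omega : ¬ k < 0), pvToDigits_eq]
theorem pvDigits_ne_nil (n : Nat) : pvDigits n ≠ [] := by
  rw [pvDigits]; split <;> simp
theorem pvDigitChar_isdigit (k : Nat) (h : k < 10) : PySem.Chars.isdigit (Nat.digitChar k) = true := by
  interval_cases k <;> decide
theorem pvDigitChar_val (k : Nat) (h : k < 10) : ((Nat.digitChar k).toNat : Int) - 48 = k := by
  interval_cases k <;> decide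
theorem pvDigits_digits (n : Nat) : ∀ c ∈ pvDigits n, PySem.Chars.isdigit c = true := by
  induction n using Nat.strong_induction_on with
  | _ n ih =>
    intro c hc
    by_cases h : n < 10
    · rw [pvDigits, dif_pos h] at hc
      simp at hc
      subst hc
      exact pvDigitChar_isdigit n h
    · rw [pvDigits, dif_neg h] at hc
      rcases List.mem_append.mp hc with h1 | h1
      · exact ih (n / 10) (Nat.div_lt_self (by omega) (by omega)) c h1
      · simp at h1
        subst h1
        exact pvDigitChar_isdigit _ (Nat.mod_lt _ (by omega))
theorem pvDigits_head_ne_zero (n : Nat) (h : n ≠ 0) : (pvDigits n).head? ≠ some '0' := by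
  induction n using Nat.strong_induction_on with
  | _ n ih =>
    by_cases hlt : n < 10
    · rw [pvDigits, dif_pos hlt]
      interval_cases n <;> simp_all <;> decide
    · rw [pvDigits, dif_neg hlt]
      obtain ⟨c, t, hct⟩ := List.exists_cons_of_ne_nil (pvDigits_ne_nil (n / 10))
      rw [hct]
      simp only [List.cons_append, List.head?_cons]
      have := ih (n / 10) (Nat.div_lt_self (by omega) (by omega)) (by omega)
      rw [hct] at this
      simpa using this

theorem pvIsdigit_bounds (c : Char) (h : PySem.Chars.isdigit c = true) : 48 ≤ c.toNat ∧ c.toNat ≤ 57 := by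
  simp only [PySem.Chars.isdigit, Bool.and_eq_true, decide_eq_true_eq] at h
  obtain ⟨h1, h2⟩ := h
  rw [Char.le_def, UInt32.le_iff_toNat_le] at h1 h2
  exact ⟨h1, h2⟩

theorem pvDigitsVal_pvDigits (n : Nat) : pvDigitsVal (pvDigits n) = (n : Int) := by
  induction n using Nat.strong_induction_on with
  | _ n ih =>
    by_cases h : n < 10
    · rw [pvDigits, dif_pos h]
      simp only [pvDigitsVal, List.foldl_cons, List.foldl_nil]
      have hd := pvDigitChar_val n h
      omega
    · rw [pvDigits, dif_neg h]
      simp only [pvDigitsVal, List.foldl_append, List.foldl_cons, List.foldl_nil]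
      have hv := ih (n / 10) (Nat.div_lt_self (by omega) (by omega))
      simp only [pvDigitsVal] at hv
      rw [hv]
      have hd := pvDigitChar_val (n % 10) (Nat.mod_lt _ (by omega))
      omega

theorem pvFold_nonneg (r : List Char) (hd : ∀ c ∈ r, PySem.Chars.isdigit c = true) :
    ∀ a : Int, 0 ≤ a → 0 ≤ r.foldl (fun a c => a * 10 + ((c.toNat : Int) - 48)) a := by
  induction r with
  | nil => intro a ha; simpa using ha
  | cons c r ih =>
    intro a ha
    simp only [List.foldl_cons]
    have hb := pvIsdigit_bounds c (hd c (List.mem_cons_self))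
    exact ih (fun c' hc' => hd c' (List.mem_cons_of_mem _ hc')) _ (by omega)

theorem pvDigitsVal_nonneg (r : List Char) (hd : ∀ c ∈ r, PySem.Chars.isdigit c = true) :
    0 ≤ pvDigitsVal r := pvFold_nonneg r hd 0 le_rfl

theorem pvFold_pos (r : List Char) (hd : ∀ c ∈ r, PySem.Chars.isdigit c = true) :
    ∀ a : Int, 1 ≤ a → 1 ≤ r.foldl (fun a c => a * 10 + ((c.toNat : Int) - 48)) a := by
  induction r with
  | nil => intro a ha; simpa using ha
  | cons c r ih =>
    intro a ha
    simp only [List.foldl_cons]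
    have hb := pvIsdigit_bounds c (hd c (List.mem_cons_self))
    exact ih (fun c' hc' => hd c' (List.mem_cons_of_mem _ hc')) _ (by omega)

theorem pvDigitsVal_pos (r : List Char) (hne : r ≠ []) (hd : ∀ c ∈ r, PySem.Chars.isdigit c = true)
    (h0 : r.head? ≠ some '0') : 1 ≤ pvDigitsVal r := by
  obtain ⟨c, t, rfl⟩ := List.exists_cons_of_ne_nil hne
  have hdc := hd c (List.mem_cons_self)
  have hb := pvIsdigit_bounds c hdc
  have hc0 : c ≠ '0' := by intro h; subst h; simp at h0
  have h48 : c.toNat ≠ 48 := by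
    intro h
    apply hc0
    have := Char.ofNat_toNat c
    rw [h] at this
    exact this.symm
  simp only [pvDigitsVal, List.foldl_cons]
  exact pvFold_pos t (fun c' hc' => hd c' (List.mem_cons_of_mem _ hc')) _ (by omega)

theorem pvDigitChar_eq (c : Char) (h : PySem.Chars.isdigit c = true) :
    Nat.digitChar (c.toNat - 48) = c := by
  obtain ⟨h1, h2⟩ := pvIsdigit_bounds c h
  have hc : Char.ofNat c.toNat = c := Char.ofNat_toNat c
  set k := c.toNat with hk
  rw [← hc]
  interval_cases k <;> decide

theorem pvDigits_zero : pvDigits 0 = ['0'] := by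
  rw [pvDigits, dif_pos (by omega : (0:Nat) < 10)]
  decide

theorem pvDigits_roundtrip (r : List Char) (hne : r ≠ []) (hd : ∀ c ∈ r, PySem.Chars.isdigit c = true)
    (hc : r = ['0'] ∨ r.head? ≠ some '0') : pvDigits (pvDigitsVal r).toNat = r := by
  induction r using List.reverseRecOn with
  | nil => cases hne rfl
  | append_singleton xs c ih =>
    have hdc : PySem.Chars.isdigit c = true := hd c (by simp)
    obtain ⟨hb1, hb2⟩ := pvIsdigit_bounds c hdc
    by_cases hxs : xs = []
    · subst hxs
      simp only [List.nil_append] at *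
      have hv : pvDigitsVal [c] = (c.toNat : Int) - 48 := by
        simp [pvDigitsVal]
      rw [hv]
      have ht : ((c.toNat : Int) - 48).toNat = c.toNat - 48 := by omega
      rw [ht, pvDigits, dif_pos (by omega : c.toNat - 48 < 10)]
      rw [pvDigitChar_eq c hdc]
    · have hdx : ∀ c' ∈ xs, PySem.Chars.isdigit c' = true := fun c' hc' => hd c' (by simp [hc'])
      have hhead : xs.head? ≠ some '0' := by
        rcases hc with h | h
        · exfalso
          have hl := congrArg List.length h
          simp only [List.length_append, List.length_cons, List.length_nil] at hl
          exact hxs (List.length_eq_zero_iff.mp (by omega))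
        · obtain ⟨x, t, rfl⟩ := List.exists_cons_of_ne_nil hxs
          simpa using h
      have hih := ih hxs hdx (Or.inr hhead)
      have hvx := pvDigitsVal_pos xs hxs hdx hhead
      have hval : pvDigitsVal (xs ++ [c]) = pvDigitsVal xs * 10 + ((c.toNat : Int) - 48) := by
        simp [pvDigitsVal, List.foldl_append]
      rw [hval]
      have h10 : ¬ (pvDigitsVal xs * 10 + ((c.toNat : Int) - 48)).toNat < 10 := by omega
      rw [pvDigits, dif_neg h10]
      have hdiv : (pvDigitsVal xs * 10 + ((c.toNat : Int) - 48)).toNat / 10 = (pvDigitsVal xs).toNat := by omega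
      have hmod : (pvDigitsVal xs * 10 + ((c.toNat : Int) - 48)).toNat % 10 = c.toNat - 48 := by omega
      rw [hdiv, hmod, hih, pvDigitChar_eq c hdc]

theorem pvToChars_val (k : Int) (h : 0 ≤ k) : pvDigitsVal (PySem.Int.toChars k) = k := by
  rw [pvToChars_nonneg k h, pvDigitsVal_pvDigits]
  omega

def pvEntryVal (s : List Char) (e : String) : Option Int :=
  if PySem.Chars.startswith e.toList s = true ∧
      (PySem.Chars.strIsdigit (e.toList.drop s.length) ∧
        (e.toList.drop s.length = ['0'] ∨ (e.toList.drop s.length).head? ≠ some '0')) then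
    some (pvDigitsVal (e.toList.drop s.length))
  else none

theorem pvCollect_aux (s : List Char) : ∀ (l : List String) (acc : PySem.Set Int),
    l.foldl (fun acc e =>
      if PySem.Chars.startswith e.toList s then
        if PySem.Chars.strIsdigit (e.toList.drop s.length) ∧
            (e.toList.drop s.length = ['0'] ∨ (e.toList.drop s.length).head? ≠ some '0') then
          PySem.Set.add acc (pvDigitsVal (e.toList.drop s.length))
        else acc
      else acc) acc = (l.filterMap (pvEntryVal s)).foldl PySem.Set.add acc := by
  intro l
  induction l with
  | nil => intro acc; simp
  | cons e l ih =>
    intro acc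
    simp only [List.foldl_cons, List.filterMap_cons]
    by_cases h1 : PySem.Chars.startswith e.toList s = true
    · by_cases h2 : PySem.Chars.strIsdigit (e.toList.drop s.length) = true ∧
          (e.toList.drop s.length = ['0'] ∨ (e.toList.drop s.length).head? ≠ some '0')
      · rw [if_pos h1, if_pos h2, ih]
        have he : pvEntryVal s e = some (pvDigitsVal (e.toList.drop s.length)) := by
          rw [pvEntryVal, if_pos ⟨h1, h2⟩]
        rw [he]
        simp [List.foldl_cons]
      · rw [if_pos h1, if_neg h2, ih]
        have he : pvEntryVal s e = none := by
          rw [pvEntryVal, if_neg]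
          rintro ⟨ha, hb⟩
          exact h2 hb
        rw [he]
    · rw [if_neg h1, ih]
      have he : pvEntryVal s e = none := by
        rw [pvEntryVal, if_neg]
        rintro ⟨ha, hb⟩
        exact h1 ha
      rw [he]

theorem pvCollect_eq (s : List Char) (l : List String) :
    pvCollect s l = PySem.Set.ofList (l.filterMap (pvEntryVal s)) := by
  rw [pvCollect, pvCollect_aux, PySem.Set.ofList_eq_foldl]
  rfl

theorem pvMem_collect (s : List Char) (l : List String) (v : Int) :
    v ∈ pvCollect s l ↔ ∃ e ∈ l, pvEntryVal s e = some v := by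
  rw [pvCollect_eq, PySem.Set.mem_ofList, List.mem_filterMap]

theorem pvNodup_collect (s : List Char) (l : List String) : (pvCollect s l).Nodup := by
  rw [pvCollect_eq]; exact PySem.Set.nodup_ofList _

theorem pvCollect_forward (s : List Char) (l : List String) (v : Int) (h : v ∈ pvCollect s l) :
    0 ≤ v ∧ String.ofList (s ++ PySem.Int.toChars v) ∈ l := by
  rw [pvMem_collect] at h
  obtain ⟨e, he, hev⟩ := h
  rw [pvEntryVal] at hev
  split_ifs at hev with hcond
  · obtain ⟨h1, h2, h3⟩ := hcond
    injection hev with hv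
    subst hv
    have hisd := h2
    simp only [PySem.Chars.strIsdigit, Bool.and_eq_true, List.all_eq_true, Bool.not_eq_eq_eq_not,
      Bool.not_true, List.isEmpty_eq_false_iff, List.isEmpty_iff] at hisd
    obtain ⟨hne, hdig⟩ := hisd
    have h0 : 0 ≤ pvDigitsVal (e.toList.drop s.length) := pvDigitsVal_nonneg _ hdig
    refine ⟨h0, ?_⟩
    obtain ⟨t, ht⟩ := (PySem.Chars.startswith_iff _ _).mp h1
    have hdropt : e.toList.drop s.length = t := by
      rw [← ht, List.drop_left]
    have hts : e.toList = s ++ e.toList.drop s.length := by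
      rw [hdropt, ht]
    have htc : PySem.Int.toChars (pvDigitsVal (e.toList.drop s.length)) = e.toList.drop s.length := by
      rw [pvToChars_nonneg _ h0, pvDigits_roundtrip _ hne hdig h3]
    rw [htc, ← hts, String.ofList_toList]
    exact he

theorem pvCanonical_pvDigits (n : Nat) : pvDigits n = ['0'] ∨ (pvDigits n).head? ≠ some '0' := by
  by_cases h : n = 0
  · subst h; exact Or.inl pvDigits_zero
  · exact Or.inr (pvDigits_head_ne_zero n h)

theorem pvStrIsdigit_pvDigits (n : Nat) : PySem.Chars.strIsdigit (pvDigits n) = true := by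
  simp only [PySem.Chars.strIsdigit, Bool.and_eq_true, List.all_eq_true, Bool.not_eq_eq_eq_not,
    Bool.not_true, List.isEmpty_eq_false_iff, List.isEmpty_iff]
  exact ⟨pvDigits_ne_nil n, pvDigits_digits n⟩

theorem pvCollect_backward (s : List Char) (l : List String) (k : Int) (hk : 0 ≤ k)
    (h : String.ofList (s ++ PySem.Int.toChars k) ∈ l) : k ∈ pvCollect s l := by
  rw [pvMem_collect]
  refine ⟨_, h, ?_⟩
  have htl : (String.ofList (s ++ PySem.Int.toChars k)).toList = s ++ PySem.Int.toChars k :=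
    String.toList_ofList
  have hdrop : (String.ofList (s ++ PySem.Int.toChars k)).toList.drop s.length = PySem.Int.toChars k := by
    rw [htl, List.drop_left]
  rw [pvEntryVal, if_pos, hdrop, pvToChars_val k hk]
  refine ⟨?_, ?_, ?_⟩
  · rw [htl]
    exact (PySem.Chars.startswith_iff _ _).mpr ⟨PySem.Int.toChars k, rfl⟩
  · rw [hdrop, pvToChars_nonneg k hk]
    exact pvStrIsdigit_pvDigits _
  · rw [hdrop, pvToChars_nonneg k hk]
    exact pvCanonical_pvDigits _

theorem pvNodup_length_le {α : Type} [DecidableEq α] (l1 l2 : List α) (h : l1.Nodup) (hs : l1 ⊆ l2) :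
    l1.length ≤ l2.length := by
  have h1 : l1.toFinset.card = l1.length := List.toFinset_card_of_nodup h
  have h2 : l1.toFinset ⊆ l2.toFinset := by
    intro x hx; simp only [List.mem_toFinset] at *; exact hs hx
  have h3 := Finset.card_le_card h2
  have h4 := l2.toFinset_card_le
  omega

theorem pvCollect_card (s : List Char) (l : List String) : (pvCollect s l).length ≤ l.length := by
  have hnd := pvNodup_collect s l
  have hmap : ((pvCollect s l).map (fun v => String.ofList (s ++ PySem.Int.toChars v))).Nodup := by
    apply List.Nodup.map_on ?_ hnd
    intro x hx y hy hxy
    have hx0 := (pvCollect_forward s l x hx).1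
    have hy0 := (pvCollect_forward s l y hy).1
    have h1 := congrArg String.toList hxy
    simp only [String.toList_ofList] at h1
    have h2 := List.append_cancel_left h1
    have hval := congrArg pvDigitsVal h2
    rwa [pvToChars_val x hx0, pvToChars_val y hy0] at hval
  have hsub : ((pvCollect s l).map (fun v => String.ofList (s ++ PySem.Int.toChars v))) ⊆ l := by
    intro x hx
    obtain ⟨v, hv, rfl⟩ := List.mem_map.mp hx
    exact (pvCollect_forward s l v hv).2
  have := pvNodup_length_le _ l hmap hsub
  simpa using this

def pvFF (P : Int → Prop) (k res : Int) : Prop := k ≤ res ∧ ¬ P res ∧ ∀ j, k ≤ j → j < res → P j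

theorem pvFF_unique {P : Int → Prop} {k a b : Int} (ha : pvFF P k a) (hb : pvFF P k b) : a = b := by
  obtain ⟨ha1, ha2, ha3⟩ := ha
  obtain ⟨hb1, hb2, hb3⟩ := hb
  rcases lt_trichotomy a b with h | h | h
  · exact absurd (hb3 a ha1 h) ha2
  · exact h
  · exact absurd (ha3 b hb1 h) hb2

theorem pvFF_iff {P Q : Int → Prop} {k res : Int} (h : pvFF P k res)
    (hiff : ∀ j, k ≤ j → (P j ↔ Q j)) : pvFF Q k res := by
  obtain ⟨h1, h2, h3⟩ := h
  exact ⟨h1, fun hq => h2 ((hiff res h1).mpr hq), fun j hj1 hj2 => (hiff j hj1).mp (h3 j hj1 hj2)⟩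

theorem pvScan_ff : ∀ (ts : List Int) (k : Int), ts.Pairwise (· < ·) →
    pvFF (· ∈ ts) k (pvScan k ts) := by
  intro ts
  induction ts with
  | nil =>
    intro k _
    rw [pvScan]
    exact ⟨le_refl k, by simp, fun j h1 h2 => absurd h2 (by omega)⟩
  | cons t ts ih =>
    intro k hp
    obtain ⟨hall, htail⟩ := List.pairwise_cons.mp hp
    rw [pvScan]
    by_cases h1 : t < k
    · rw [if_pos h1]
      obtain ⟨ha, hb, hc⟩ := ih k htail
      refine ⟨ha, ?_, ?_⟩
      · intro hmem
        rcases List.mem_cons.mp hmem with heq | hmem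
        · omega
        · exact hb hmem
      · exact fun j hj1 hj2 => List.mem_cons_of_mem _ (hc j hj1 hj2)
    · rw [if_neg h1]
      by_cases h2 : t = k
      · rw [if_pos h2]
        obtain ⟨ha, hb, hc⟩ := ih (k + 1) htail
        refine ⟨by omega, ?_, ?_⟩
        · intro hmem
          rcases List.mem_cons.mp hmem with heq | hmem
          · omega
          · exact hb hmem
        · intro j hj1 hj2
          by_cases hj : j = k
          · subst hj
            subst h2
            exact List.mem_cons_self
          · exact List.mem_cons_of_mem _ (hc j (by omega) hj2)
      · rw [if_neg h2]
        refine ⟨le_refl k, ?_, fun j hj1 hj2 => absurd hj2 (by omega)⟩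
        intro hmem
        rcases List.mem_cons.mp hmem with heq | hmem
        · omega
        · exact absurd (hall k hmem) (by omega)

theorem pvProbeA_ff (l : List String) (s : List Char) : ∀ (m : Nat) (k : Int),
    (∃ j, k ≤ j ∧ j < k + m ∧ String.ofList (s ++ PySem.Int.toChars j) ∉ l) →
    pvFF (fun j => String.ofList (s ++ PySem.Int.toChars j) ∈ l) k (pvProbeA l s m k) := by
  intro m
  induction m with
  | zero =>
    intro k hex
    obtain ⟨j, h1, h2, _⟩ := hex
    exfalso
    simp only [Nat.cast_zero] at h2
    omega
  | succ m ih =>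
    intro k hex
    rw [pvProbeA]
    by_cases hk : String.ofList (s ++ PySem.Int.toChars k) ∈ l
    · rw [if_pos hk]
      have hex' : ∃ j, k + 1 ≤ j ∧ j < (k + 1) + m ∧ String.ofList (s ++ PySem.Int.toChars j) ∉ l := by
        obtain ⟨j, h1, h2, h3⟩ := hex
        have hjk : j ≠ k := by rintro rfl; exact h3 hk
        refine ⟨j, by omega, ?_, h3⟩
        push_cast at h2 ⊢
        omega
      obtain ⟨ha, hb, hc⟩ := ih (k + 1) hex'
      refine ⟨by omega, hb, ?_⟩
      intro j hj1 hj2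
      by_cases hj : j = k
      · subst hj; exact hk
      · exact hc j (by omega) hj2
    · rw [if_neg hk]
      exact ⟨le_refl k, hk, fun j h1 h2 => absurd h2 (by omega)⟩

theorem pvExists_free (l : List String) (s : List Char) (k : Int) (hk : 0 ≤ k) :
    ∃ j, k ≤ j ∧ j < k + (l.length + 1) ∧ String.ofList (s ++ PySem.Int.toChars j) ∉ l := by
  by_contra hcon
  push_neg at hcon
  have hsub : ∀ i : Nat, i < l.length + 1 → k + i ∈ pvCollect s l := by
    intro i hi
    apply pvCollect_backward s l (k + i) (by omega)
    apply hcon (k + i) (by omega)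
    push_cast
    omega
  have hndint : ((List.range (l.length + 1)).map (fun i : Nat => k + (i : Int))).Nodup := by
    apply List.Nodup.map_on ?_ (List.nodup_range)
    intro x hx y hy hxy
    omega
  have hsub2 : ((List.range (l.length + 1)).map (fun i : Nat => k + (i : Int))) ⊆ pvCollect s l := by
    intro x hx
    obtain ⟨i, hi, rfl⟩ := List.mem_map.mp hx
    exact hsub i (List.mem_range.mp hi)
  have hle := pvNodup_length_le _ _ hndint hsub2
  have hcard := pvCollect_card s l
  simp only [List.length_map, List.length_range] at hle
  omega

theorem pvMain_eq (l : List String) (s : List Char) (k : Int) (hk : 0 ≤ k) :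
    pvProbeA l s (l.length + 1) k
      = pvScan k (PySem.List.sorted (pvCollect s l) (fun x => x) false) := by
  have hperm := PySem.List.sorted_perm (pvCollect s l) (fun x => x) false
  have hnd : (PySem.List.sorted (pvCollect s l) (fun x => x) false).Nodup :=
    hperm.nodup_iff.mpr (pvNodup_collect s l)
  have hle : (PySem.List.sorted (pvCollect s l) (fun x => x) false).Pairwise (· ≤ ·) :=
    PySem.List.sorted_pairwise (pvCollect s l) (fun x => x)
  have hlt : (PySem.List.sorted (pvCollect s l) (fun x => x) false).Pairwise (· < ·) :=
    (hle.and hnd).imp (fun h => lt_of_le_of_ne h.1 h.2)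
  have hffB := pvScan_ff _ k hlt
  have hffB' : pvFF (fun j => String.ofList (s ++ PySem.Int.toChars j) ∈ l) k
      (pvScan k (PySem.List.sorted (pvCollect s l) (fun x => x) false)) := by
    apply pvFF_iff hffB
    intro j hj
    rw [PySem.List.mem_sorted]
    constructor
    · intro hmem; exact (pvCollect_forward s l j hmem).2
    · intro hmem; exact pvCollect_backward s l j (by omega) hmem
  have hffA := pvProbeA_ff l s (l.length + 1) k (pvExists_free l s k hk)
  exact pvFF_unique hffA hffB'

theorem pvScan_neg (l : List String) (s : List Char) (k : Int) (hk : k < 0) :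
    pvScan k (PySem.List.sorted (pvCollect s l) (fun x => x) false) = k := by
  cases hts : PySem.List.sorted (pvCollect s l) (fun x => x) false with
  | nil => rw [pvScan]
  | cons t ts =>
    have ht : t ∈ pvCollect s l := by
      rw [← PySem.List.mem_sorted (pvCollect s l) (fun x => x) false, hts]
      exact List.mem_cons_self
    have h0 := (pvCollect_forward s l t ht).1
    rw [pvScan, if_neg (by omega), if_neg (by omega)]


theorem pvAlphaCount_take (cs : List Char) :
    cs.take (pvAlphaCount cs) = cs.takeWhile (fun ch => PySem.Chars.isalpha ch) := by
  induction cs with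
  | nil => rfl
  | cons ch t ih =>
    rw [pvAlphaCount]
    by_cases h : PySem.Chars.isalpha ch
    · rw [if_pos h, List.take_succ_cons, List.takeWhile_cons_of_pos (by simpa using h), ih]
    · rw [if_neg h, List.take_zero, List.takeWhile_cons_of_neg (by simpa using h)]

theorem pvAlphaCount_drop (cs : List Char) :
    cs.drop (pvAlphaCount cs) = cs.dropWhile (fun ch => PySem.Chars.isalpha ch) := by
  induction cs with
  | nil => rfl
  | cons ch t ih =>
    rw [pvAlphaCount]
    by_cases h : PySem.Chars.isalpha ch
    · rw [if_pos h, List.drop_succ_cons, List.dropWhile_cons_of_pos (by simpa using h), ih]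
    · rw [if_neg h, List.drop_zero, List.dropWhile_cons_of_neg (by simpa using h)]

-- ===== VERDICT (by name: the statement is the Claim_ definition above) =====
theorem solution_spec : Claim_equal_solution := by
  intro l nid _hdom hpre
  unfold Spec_solution solution solution_alt
  by_cases hmem : nid ∈ l
  · rw [if_neg (by simpa using hmem), if_neg (by simpa using hmem)]
    dsimp only
    rcases hpre with hout | hpre
    · exact absurd hmem hout
    dsimp only at hpre
    rw [pvAlphaCount_take nid.toList, pvAlphaCount_drop nid.toList]
    by_cases hn : nid.toList.dropWhile (fun ch => PySem.Chars.isalpha ch) = []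
    · rw [if_pos hn]
      rw [pvMain_eq l _ 1 (by omega)]
    · rw [if_neg hn]
      rcases hpre with hn' | ⟨_hsome, hor⟩
      · exact absurd hn' hn
      by_cases hv : -1 ≤ (PySem.Int.ofChars? (nid.toList.dropWhile (fun ch => PySem.Chars.isalpha ch))).getD 0
      · rw [pvMain_eq l _ _ (by omega)]
      · rcases hor with hv' | hfree
        · exact absurd hv' hv
        · rw [pvScan_neg l _ _ (by omega), pvProbeA, if_neg hfree]
  · rw [if_pos hmem, if_pos hmem]
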